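-- pv_equiv track=rewrite | github.com/Bl00drav3n/AdventOfCode | 2024/05/main.py | check_updates
-- ===== SOURCE A (Python) =====
-- def verify(rules, update):
--     for i in range(len(update)):
--         index = len(update) - i - 1
--         page = update[index]
--         for j in range(index):
--             if update[j] in rules[page]:
--                 return False
--     return True
--
-- def check_updates(rule_table, updates):
--     correct_updates = []
--     incorrect_updates = []
--     for update in updates:
--         if verify(rule_table, update):
--             correct_updates.append(update)
--         else:
--             incorrect_updates.append(update)
--     return correct_updates, incorrect_updates
-- ===== SOURCE B (Python) =====
-- def _ok(rules, update):
--     # Position-index check: one pass builds first/last occurrence indices,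
--     # then each distinct page's rule list is tested against the index.
--     first = {}
--     last = {}
--     for i, p in enumerate(update):
--         if p not in first:
--             first[p] = i
--         last[p] = i
--     n = len(update)
--     for p, i in last.items():
--         if i and any(first.get(r, n) < i for r in rules[p]):
--             return False
--     return True
--
-- def check_updates(rule_table, updates):
--     correct_updates, incorrect_updates = [], []
--     for update in updates:
--         (correct_updates if _ok(rule_table, update) else incorrect_updates).append(update)
--     return correct_updates, incorrect_updates
-- ===== Notes on version B (the rewrite author's own statement) =====
-- stated objective: alternative
-- what changed: Replaces A's reversed nested pairwise scan with a position-index algorithm: one pass over the update builds first- and last-occurrence index dicts, then each distinct page's rule list is checked against the index (violation iff some required-after page has a first occurrence before the page's last occurrence), so the inner scan over earlier elements disappears.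
-- outside the precondition, e.g. on check_updates({1: [2]}, [[3, 2, 1]]): A returns ([], [[3, 2, 1]]), B raises KeyError
import Mathlib
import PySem

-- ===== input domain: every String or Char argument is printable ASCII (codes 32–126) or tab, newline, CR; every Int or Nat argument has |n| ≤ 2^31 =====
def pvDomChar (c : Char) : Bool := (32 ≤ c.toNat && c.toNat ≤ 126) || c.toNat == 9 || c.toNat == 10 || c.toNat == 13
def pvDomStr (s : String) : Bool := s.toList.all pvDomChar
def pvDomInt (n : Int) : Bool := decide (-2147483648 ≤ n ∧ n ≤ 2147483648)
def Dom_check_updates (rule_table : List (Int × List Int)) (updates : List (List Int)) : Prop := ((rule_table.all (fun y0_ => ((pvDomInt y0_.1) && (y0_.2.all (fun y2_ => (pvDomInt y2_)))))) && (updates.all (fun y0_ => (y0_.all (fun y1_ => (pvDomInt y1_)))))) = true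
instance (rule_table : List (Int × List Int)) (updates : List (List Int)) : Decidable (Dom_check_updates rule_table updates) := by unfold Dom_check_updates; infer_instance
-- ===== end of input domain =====

-- B replaces A's reversed nested pairwise scan by a position-index algorithm (one pass builds
-- first/last occurrence dicts, then rule lists are checked against the index); the equivalence
-- proved is about the return value.

-- rules[page]: first-match association lookup (dict); total form, exact under Pre_ (key present)
def pvLookup (rules : List (Int × List Int)) (page : Int) : List Int :=
  ((rules.find? (fun p => p.1 == page)).map (·.2)).getD []

-- ===== PORT A =====
def verify (rules : List (Int × List Int)) (update : List Int) : Bool :=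
  (List.range update.length).all (fun i =>
    let index := update.length - i - 1
    let page := update.getD index 0
    (List.range index).all (fun j =>
      !((pvLookup rules page).contains (update.getD j 0))))

def check_updates (rule_table : List (Int × List Int)) (updates : List (List Int)) : List (List Int) × List (List Int) :=
  updates.foldl (fun acc update =>
    if verify rule_table update then (acc.1 ++ [update], acc.2)
    else (acc.1, acc.2 ++ [update])) ([], [])

-- ===== PORT B =====
-- one pass over enumerate(update): first records an index only for unseen pages, last overwrites;
-- then 'if i and any(first.get(r, n) < i for r in rules[p]): return False' over the items of last
def okAlt (rules : List (Int × List Int)) (update : List Int) : Bool :=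
  match (PySem.List.enumerate update 0).foldl
      (fun (st : PySem.Dict Int Int × PySem.Dict Int Int) q =>
        ((if st.1.contains q.2 then st.1 else st.1.insert q.2 q.1), st.2.insert q.2 q.1))
      (PySem.Dict.empty, PySem.Dict.empty) with
  | (first, last) =>
      last.items.all (fun q =>
        !(decide (q.2 ≠ 0) &&
          (pvLookup rules q.1).any (fun r => decide (first.getD r (update.length : Int) < q.2))))

def check_updates_alt (rule_table : List (Int × List Int)) (updates : List (List Int)) : List (List Int) × List (List Int) :=
  updates.foldl (fun acc update =>
    if okAlt rule_table update then (acc.1 ++ [update], acc.2)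
    else (acc.1, acc.2 ++ [update])) ([], [])

-- ===== PRECONDITION & SPEC =====
-- Pre_ excludes inputs where some page other than the first of an update is missing from the
-- rule table: there the dict lookup rules[page] can raise KeyError (in A, in B, or in only one
-- of them, depending on scan order), so neither behaviour is the specified one.
def Pre_check_updates (rule_table : List (Int × List Int)) (updates : List (List Int)) : Prop :=
  (updates.all (fun u => (u.drop 1).all (fun p => rule_table.any (fun r => r.1 == p)))) = true
instance (rule_table : List (Int × List Int)) (updates : List (List Int)) : Decidable (Pre_check_updates rule_table updates) := by unfold Pre_check_updates; infer_instance

def pvWitness_check_updates : (List (Int × List Int)) × List (List Int) :=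
  ([(1, [2]), (2, []), (3, [1])], [[1, 2, 3], [3, 1, 2]])

def Spec_check_updates (rule_table : List (Int × List Int)) (updates : List (List Int)) (out : List (List Int) × List (List Int)) : Prop := out = check_updates_alt rule_table updates
instance (rule_table : List (Int × List Int)) (updates : List (List Int)) (out : List (List Int) × List (List Int)) : Decidable (Spec_check_updates rule_table updates out) := by unfold Spec_check_updates; infer_instance

-- ===== CLAIM (what is proved, stated in full; the proofs are below) =====
def Claim_equal_check_updates : Prop := ∀ (rule_table : List (Int × List Int)) (updates : List (List Int)), Dom_check_updates rule_table updates → Pre_check_updates rule_table updates → Spec_check_updates rule_table updates (check_updates rule_table updates)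

-- ===== LEMMAS AND PROOFS =====

-- the common characterisation: no page has an earlier page listed in its rules
def NoViol (rules : List (Int × List Int)) (u : List Int) : Prop :=
  ∀ k, k < u.length → ∀ r, r ∈ pvLookup rules (u.getD k 0) → r ∉ u.take k

lemma mem_take_iff (u : List Int) (k : Nat) (r : Int) (hk : k ≤ u.length) :
    r ∈ u.take k ↔ ∃ j, j < k ∧ u.getD j 0 = r := by
  constructor
  · intro h
    obtain ⟨i, hi, hget⟩ := List.mem_iff_getElem.1 h
    have hi' : i < u.length := by simp at hi; omega
    refine ⟨i, by simp at hi; omega, ?_⟩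
    rw [List.getD_eq_getElem u 0 hi', ← hget, List.getElem_take]
  · rintro ⟨j, hj, rfl⟩
    have hj' : j < u.length := lt_of_lt_of_le hj hk
    rw [List.getD_eq_getElem u 0 hj']
    exact List.mem_iff_getElem.2 ⟨j, by simp; omega, by rw [List.getElem_take]⟩

lemma verify_iff (rules : List (Int × List Int)) (u : List Int) :
    verify rules u = true ↔ NoViol rules u := by
  unfold verify NoViol
  simp only [List.all_eq_true, List.mem_range, Bool.not_eq_true', List.contains_eq_mem,
    decide_eq_false_iff_not]
  constructor
  · intro h k hk r hr hrt
    obtain ⟨j, hj, rfl⟩ := (mem_take_iff u k r (le_of_lt hk)).1 hrt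
    have h2 := h (u.length - 1 - k) (by omega) j (by omega)
    rw [show u.length - (u.length - 1 - k) - 1 = k from by omega] at h2
    exact h2 hr
  · intro h i hi j hj hmem
    exact h (u.length - i - 1) (by omega) _ hmem
      ((mem_take_iff u (u.length - i - 1) _ (by omega)).2 ⟨j, by omega, rfl⟩)

theorem idxOf_le_getElem (u : List Int) (j : Nat) (h : j < u.length) : u.idxOf u[j] ≤ j := by
  induction u generalizing j with
  | nil => simp at h
  | cons x xs ih =>
      have h' : j < xs.length + 1 := by simpa using h
      cases j with
      | zero => simp
      | succ j' =>
          have hj : j' < xs.length := by omega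
          rw [List.getElem_cons_succ, List.idxOf_cons]
          cases hbx : x == xs[j'] with
          | true => simp
          | false =>
              simp only [cond_false]
              exact Nat.succ_le_succ (ih j' hj)

-- index of the LAST occurrence of r in u (meaningful when r ∈ u)
def lastIdx : List Int → Int → Nat
  | [], _ => 0
  | _ :: xs, r => if r ∈ xs then lastIdx xs r + 1 else 0

lemma lastIdx_lt (u : List Int) (r : Int) (h : r ∈ u) : lastIdx u r < u.length := by
  induction u with
  | nil => cases h
  | cons x xs ih =>
      by_cases hm : r ∈ xs
      · have := ih hm
        simp only [lastIdx, hm, if_true, List.length_cons]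
        omega
      · simp [lastIdx, hm]

lemma getD_lastIdx (u : List Int) (r : Int) (h : r ∈ u) : u.getD (lastIdx u r) 0 = r := by
  induction u with
  | nil => cases h
  | cons x xs ih =>
      by_cases hm : r ∈ xs
      · simpa [lastIdx, hm] using ih hm
      · have hrx : r = x := by
          rcases List.mem_cons.1 h with h1 | h1
          · exact h1
          · exact absurd h1 hm
        subst hrx
        simp [lastIdx, hm]

lemma le_lastIdx (u : List Int) (r : Int) (k : Nat) (hk : k < u.length) (hg : u.getD k 0 = r) :
    k ≤ lastIdx u r := by
  induction u generalizing k with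
  | nil => simp at hk
  | cons x xs ih =>
      cases k with
      | zero => simp
      | succ k' =>
          have hk' : k' < xs.length := by simpa using hk
          have hg' : xs.getD k' 0 = r := by simpa using hg
          have hm : r ∈ xs := by
            rw [← hg', List.getD_eq_getElem xs 0 hk']; exact List.getElem_mem hk'
          simp only [lastIdx, hm, if_true]
          exact Nat.succ_le_succ (ih k' hk' hg')

-- first-occurrence dict: get? after the fold is idxOf
lemma firstFold_get? (u : List Int) (r : Int) : ∀ (s : Int) (d : PySem.Dict Int Int),
    ((PySem.List.enumerate u s).foldl
        (fun d q => if d.contains q.2 then d else d.insert q.2 q.1) d).get? r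
      = if d.contains r then d.get? r
        else if r ∈ u then some (s + (u.idxOf r : Int)) else none := by
  induction u with
  | nil =>
      intro s d
      simp only [PySem.List.enumerate_nil, List.foldl_nil, List.not_mem_nil, if_false]
      by_cases hr : d.contains r = true
      · simp [hr]
      · simp only [Bool.not_eq_true] at hr
        simp [hr, PySem.Dict.get?_eq_none_iff_contains]
  | cons x xs ih =>
      intro s d
      rw [PySem.List.enumerate_cons, List.foldl_cons]
      by_cases hc : d.contains x = true
      · rw [if_pos hc, ih]
        by_cases hr : d.contains r = true
        · simp [hr]
        · rw [if_neg hr, if_neg hr]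
          have hx : x ≠ r := fun he => hr (he ▸ hc)
          have hbe : (x == r) = false := by simp [hx]
          rw [List.idxOf_cons, hbe]
          simp only [cond_false, List.mem_cons, eq_comm (a := r) (b := x), hx, false_or]
          by_cases hm : r ∈ xs
          · simp only [hm, if_true]
            congr 1
            push_cast
            ring
          · simp [hm]
      · rw [if_neg hc, ih]
        by_cases hx : x = r
        · subst hx
          rw [if_pos (PySem.Dict.contains_insert_self d x s), PySem.Dict.get?_insert_self,
            if_neg (by simpa using hc), List.idxOf_cons]
          simp
        · have h1 : (d.insert x s).contains r = d.contains r := by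
            rw [PySem.Dict.contains_insert]
            simp [Ne.symm hx]
          rw [h1]
          by_cases hr : d.contains r = true
          · rw [if_pos hr, if_pos hr]
            exact PySem.Dict.get?_insert_of_ne d s (Ne.symm hx)
          · rw [if_neg hr, if_neg hr]
            have hbe : (x == r) = false := by simp [hx]
            rw [List.idxOf_cons, hbe]
            simp only [cond_false, List.mem_cons, eq_comm (a := r) (b := x), hx, false_or]
            by_cases hm : r ∈ xs
            · simp only [hm, if_true]
              congr 1
              push_cast
              ring
            · simp [hm]

-- last-occurrence dict: get? after the fold is lastIdx
lemma lastFold_get? (u : List Int) (r : Int) : ∀ (s : Int) (d : PySem.Dict Int Int),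
    ((PySem.List.enumerate u s).foldl (fun d q => d.insert q.2 q.1) d).get? r
      = if r ∈ u then some (s + (lastIdx u r : Int)) else d.get? r := by
  induction u with
  | nil => intro s d; simp [PySem.List.enumerate_nil]
  | cons x xs ih =>
      intro s d
      rw [PySem.List.enumerate_cons, List.foldl_cons]
      dsimp only
      rw [ih]
      by_cases hm : r ∈ xs
      · rw [if_pos hm, if_pos (List.mem_cons.2 (Or.inr hm))]
        simp only [lastIdx, hm, if_true]
        congr 1
        push_cast
        ring
      · rw [if_neg hm]
        by_cases hx : r = x
        · subst hx
          rw [if_pos (List.mem_cons.2 (Or.inl rfl)), PySem.Dict.get?_insert_self]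
          simp [lastIdx, hm]
        · rw [if_neg (by simp [List.mem_cons, hx, hm])]
          exact PySem.Dict.get?_insert_of_ne d s hx

lemma okAlt_iff (rules : List (Int × List Int)) (u : List Int) :
    okAlt rules u = true ↔ NoViol rules u := by
  unfold okAlt
  rw [PySem.List.foldl_prod_mk
    (fun (a : PySem.Dict Int Int) (q : Int × Int) => if a.contains q.2 then a else a.insert q.2 q.1)
    (fun (a : PySem.Dict Int Int) (q : Int × Int) => a.insert q.2 q.1)]
  have hnd : ((PySem.List.enumerate u 0).foldl
      (fun (d : PySem.Dict Int Int) q => d.insert q.2 q.1) PySem.Dict.empty).keys.Nodup := by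
    exact PySem.Dict.nodup_keys_foldl_insert_key _ (fun (q : Int × Int) => q.2)
      (fun (d : PySem.Dict Int Int) (q : Int × Int) => q.1) _ (by simp [PySem.Dict.keys_empty])
  simp only [List.all_eq_true, Bool.not_eq_true', Bool.and_eq_false_iff, decide_eq_false_iff_not,
    not_not, List.any_eq_false]
  constructor
  · -- B's check passes → NoViol
    intro h k hk r hr hrt
    obtain ⟨j, hj, hgj⟩ := (mem_take_iff u k r (le_of_lt hk)).1 hrt
    have hj' : j < u.length := by omega
    set p := u.getD k 0 with hp
    have hpm : p ∈ u := by
      rw [hp, List.getD_eq_getElem u 0 hk]; exact List.getElem_mem hk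
    have hrm : r ∈ u := by
      rw [← hgj, List.getD_eq_getElem u 0 hj']; exact List.getElem_mem hj'
    have hitem : (p, ((lastIdx u p : Int))) ∈ ((PySem.List.enumerate u 0).foldl
        (fun (d : PySem.Dict Int Int) q => d.insert q.2 q.1) PySem.Dict.empty).items := by
      apply PySem.Dict.mem_items_of_get?_eq_some
      rw [lastFold_get? u p 0]; simp [hpm]
    have h2 := h _ hitem
    dsimp only at h2
    have hkle : k ≤ lastIdx u p := le_lastIdx u p k hk rfl
    rcases h2 with h2 | h2
    · exfalso; have : (0:Int) < (lastIdx u p : Int) := by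
        have : 0 < lastIdx u p := by omega
        exact_mod_cast this
      omega
    · have h3 := h2 r hr
      simp only [decide_eq_true_eq] at h3
      have hfi := firstFold_get? u r 0 PySem.Dict.empty
      simp only [PySem.Dict.contains_empty, Bool.false_eq_true, if_false, hrm, if_true] at hfi
      rw [PySem.Dict.getD_eq_get?_getD, hfi] at h3
      simp only [Option.getD_some, zero_add] at h3
      have hile : u.idxOf r ≤ j := by
        rw [← hgj, List.getD_eq_getElem u 0 hj']
        exact idxOf_le_getElem u j hj'
      have hcast : (u.idxOf r : Int) < (lastIdx u p : Int) := by
        have : u.idxOf r < lastIdx u p := by omega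
        exact_mod_cast this
      exact absurd hcast h3
  · -- NoViol → B's check passes
    intro h q hq
    obtain ⟨p, i⟩ := q
    have hget : ((PySem.List.enumerate u 0).foldl
        (fun (d : PySem.Dict Int Int) q => d.insert q.2 q.1) PySem.Dict.empty).get? p = some i :=
      (PySem.Dict.get?_eq_some_iff_mem_items _ p i hnd).2 hq
    rw [lastFold_get? u p 0] at hget
    by_cases hpm : p ∈ u
    · simp only [hpm, if_true, Option.some_inj, zero_add] at hget
      by_cases hi0 : i = 0
      · left; simpa using hi0
      · right
        intro r hr
        dsimp only
        simp only [decide_eq_true_eq]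
        have hk : lastIdx u p < u.length := lastIdx_lt u p hpm
        have hnv := h (lastIdx u p) hk r (by rw [getD_lastIdx u p hpm]; exact hr)
        rw [mem_take_iff u (lastIdx u p) r (le_of_lt hk)] at hnv
        push Not at hnv
        rw [PySem.Dict.getD_eq_get?_getD, firstFold_get? u r 0]
        simp only [PySem.Dict.contains_empty, Bool.false_eq_true, if_false]
        by_cases hrm : r ∈ u
        · rw [if_pos hrm]
          simp only [Option.getD_some, zero_add]
          have hidx : u.idxOf r < u.length := List.idxOf_lt_length_of_mem hrm
          have hgr : u.getD (u.idxOf r) 0 = r := by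
            rw [List.getD_eq_getElem u 0 hidx]; exact List.getElem_idxOf hidx
          have h4 : ¬ u.idxOf r < lastIdx u p := fun hlt => (hnv (u.idxOf r) hlt) hgr
          subst hget
          intro hcon
          exact h4 (by exact_mod_cast hcon)
        · rw [if_neg hrm]
          simp only [Option.getD_none]
          subst hget
          intro hcon
          have hc2 : (lastIdx u p : Int) < (u.length : Int) := by exact_mod_cast hk
          omega
    · exfalso
      simp only [hpm, if_false] at hget
      simp [PySem.Dict.get?_empty] at hget

lemma verify_eq_okAlt (rules : List (Int × List Int)) (u : List Int) :
    verify rules u = okAlt rules u := by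
  cases h : okAlt rules u
  · rw [Bool.eq_false_iff]
    intro hv
    exact absurd ((okAlt_iff rules u).2 ((verify_iff rules u).1 hv)) (by simp [h])
  · exact (verify_iff rules u).2 ((okAlt_iff rules u).1 h)

-- ===== VERDICT (by name: the statement is the Claim_ definition above) =====
theorem check_updates_spec : Claim_equal_check_updates := by
  intro rule_table updates _ _
  unfold Spec_check_updates check_updates check_updates_alt
  simp only [verify_eq_okAlt]
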